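-- pv_equiv track=rewrite | github.com/Fapputa/Nanachi | prushka.py | reorder_ops_for_format
-- ===== SOURCE A (Python) =====
-- def reorder_ops_for_format(ops, format_tags):
--     """Réordonne les ops selon le format détecté.
--     Uniquement pour les formats certains : binary, octal, morse, url_encoded.
--     """
--     if not format_tags:
--         return ops
--
--     tag = format_tags[0]
--
--     PRIORITY = {
--         'binary':          {37},    # ← Binaire vers texte EN PREMIER
--         'morse':           {54},    # ← Morse vers texte EN PREMIER
--         'url_encoded':     {60},    # URL decode EN PREMIER
--         'hex_pairs':       {35},    # ← Hex vers texte EN PREMIER (paires strictes)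
--         'pure_hex':        {35},    # ← Hex vers texte EN PREMIER (continu sans espaces)
--         'reversed_base64': {140},   # ← Base64 renversé EN PREMIER
--     }
--
--     priority_nums = PRIORITY.get(tag, set())
--     if not priority_nums:
--         return ops  # format non géré → ne pas toucher
--
--     # ── Opérations INUTILES sur du hex pur ou des paires hex ─────────────────
--     # César/ROT/Atbash/Vigenère/XOR fixes appliqués sur du texte hex = bruit pur
--     # On les pousse EN DERNIER pour ne pas polluer le collector dès depth=1
--     # César shifts 1-25, ROT13(26), Atbash(27), ROT47(101), XOR fixes(45-50),
--     # AND(51), OR(52), leet(55/56), shift_one(67/68), alternate(64), etc.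
--     HEX_USELESS = (
--         set(range(1, 28))       # César 1-25 + ROT13 + Atbash
--         | {101}                 # ROT47
--         | set(range(45, 51))    # XOR key=1,7,13,42,85,127
--         | {51, 52}              # AND, OR
--         | {55, 56}              # leet / unleet
--         | {64, 67, 68}          # alternate case, shift+1, shift-1
--         | {80, 81, 82}          # transposition colonnes
--         | {83, 84}              # Bacon, T9
--         | {89, 90, 91, 92, 93}  # Vigenère clés communes
--         | {102, 103}            # César variable, Vigenère brute
--         | {104, 105, 106}       # Rail Fence
--     )
--
--     if tag in ('pure_hex', 'hex_pairs', 'binary'):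
--         if tag == 'binary':
--             USELESS = (set(range(1, 28)) | {51, 52, 55, 56, 67, 68}
--                        | {29, 30, 31, 64, 69, 70, 80, 81, 82, 83, 84, 85, 86, 87, 88})
--         else:
--             USELESS = HEX_USELESS
--         first  = [op for op in ops if op[0] in priority_nums]
--         middle = [op for op in ops if op[0] not in priority_nums
--                   and not (isinstance(op[0], int) and op[0] in USELESS)]
--         last   = [op for op in ops if isinstance(op[0], int) and op[0] in USELESS]
--         return first + middle + last
--
--     # Autres formats : juste remonter les ops prioritaires en tête
--     first  = [op for op in ops if op[0] in priority_nums]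
--     rest   = [op for op in ops if op[0] not in priority_nums]
--     return first + rest
-- ===== SOURCE B (Python) =====
-- def reorder_ops_for_format(ops, format_tags):
--     """Reimplementation: one stable sort by a 3-level rank instead of three
--     separate filtering passes; stability keeps within-bucket order."""
--     if not format_tags:
--         return ops
--
--     tag = format_tags[0]
--
--     PRIORITY = {
--         'binary':          {37},
--         'morse':           {54},
--         'url_encoded':     {60},
--         'hex_pairs':       {35},
--         'pure_hex':        {35},
--         'reversed_base64': {140},
--     }
--
--     priority_nums = PRIORITY.get(tag, set())
--     if not priority_nums:
--         return ops
--
--     if tag in ('pure_hex', 'hex_pairs', 'binary'):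
--         if tag == 'binary':
--             USELESS = (set(range(1, 28)) | {51, 52, 55, 56, 67, 68}
--                        | {29, 30, 31, 64, 69, 70, 80, 81, 82, 83, 84, 85, 86, 87, 88})
--         else:
--             USELESS = (set(range(1, 28)) | {101} | set(range(45, 51)) | {51, 52}
--                        | {55, 56} | {64, 67, 68} | {80, 81, 82} | {83, 84}
--                        | {89, 90, 91, 92, 93} | {102, 103} | {104, 105, 106})
--
--         def rank(op):
--             if op[0] in priority_nums:
--                 return 0
--             if isinstance(op[0], int) and op[0] in USELESS:
--                 return 2
--             return 1
--     else:
--         def rank(op):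
--             return 0 if op[0] in priority_nums else 1
--
--     return sorted(ops, key=rank)
-- ===== Notes on version B (the rewrite author's own statement) =====
-- stated objective: simpler
-- what changed: Replaces A's three (resp. two) separate filtering passes and list concatenation with a single stable sort by a small 0/1/2 rank function; stability of the sort reproduces A's within-bucket order exactly.
import Mathlib
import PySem

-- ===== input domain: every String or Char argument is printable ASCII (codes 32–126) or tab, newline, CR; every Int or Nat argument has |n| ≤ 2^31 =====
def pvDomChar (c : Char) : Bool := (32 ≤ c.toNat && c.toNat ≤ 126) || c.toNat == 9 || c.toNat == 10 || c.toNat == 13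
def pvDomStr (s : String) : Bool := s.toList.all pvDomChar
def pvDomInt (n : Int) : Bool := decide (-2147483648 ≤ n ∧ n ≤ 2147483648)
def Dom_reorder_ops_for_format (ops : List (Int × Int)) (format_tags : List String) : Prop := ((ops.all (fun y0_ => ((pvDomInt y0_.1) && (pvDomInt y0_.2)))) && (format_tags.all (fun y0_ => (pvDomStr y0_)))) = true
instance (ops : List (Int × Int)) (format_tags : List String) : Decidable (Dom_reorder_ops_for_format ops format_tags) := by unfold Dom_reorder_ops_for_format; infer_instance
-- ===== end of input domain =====

-- B replaces A's three filtering passes with one stable sort by a small rank function (objective: simpler/alternative, not faster).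

-- ===== PORT A =====
-- Python set literals of ints are ported as lists of their distinct elements; membership is `contains`.
def pvPriority (tag : String) : List Int :=
  if tag = "binary" then [37]
  else if tag = "morse" then [54]
  else if tag = "url_encoded" then [60]
  else if tag = "hex_pairs" then [35]
  else if tag = "pure_hex" then [35]
  else if tag = "reversed_base64" then [140]
  else []

-- set(range(1,28)) | {51,52,55,56,67,68} | {29,30,31,64,69,70,80..88}
def pvBinaryUseless : List Int :=
  [1,2,3,4,5,6,7,8,9,10,11,12,13,14,15,16,17,18,19,20,21,22,23,24,25,26,27,
   51,52,55,56,67,68,29,30,31,64,69,70,80,81,82,83,84,85,86,87,88]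

-- HEX_USELESS = set(range(1,28)) | {101} | set(range(45,51)) | {51,52} | {55,56} | {64,67,68}
--   | {80,81,82} | {83,84} | {89..93} | {102,103} | {104,105,106}
def pvHexUseless : List Int :=
  [1,2,3,4,5,6,7,8,9,10,11,12,13,14,15,16,17,18,19,20,21,22,23,24,25,26,27,
   101,45,46,47,48,49,50,51,52,55,56,64,67,68,80,81,82,83,84,89,90,91,92,93,
   102,103,104,105,106]

def reorder_ops_for_format (ops : List (Int × Int)) (format_tags : List String) : List (Int × Int) :=
  match format_tags with
  | [] => ops
  | tag :: _ =>
    let priority_nums := pvPriority tag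
    if priority_nums = [] then ops
    else if tag = "pure_hex" ∨ tag = "hex_pairs" ∨ tag = "binary" then
      let USELESS := if tag = "binary" then pvBinaryUseless else pvHexUseless
      -- op[0] is always an int here, so `isinstance(op[0], int)` is True
      let first  := ops.filter (fun op => priority_nums.contains op.1)
      let middle := ops.filter (fun op => !(priority_nums.contains op.1) && !(USELESS.contains op.1))
      let last   := ops.filter (fun op => USELESS.contains op.1)
      first ++ middle ++ last
    else
      let first := ops.filter (fun op => priority_nums.contains op.1)
      let rest  := ops.filter (fun op => !(priority_nums.contains op.1))
      first ++ rest

-- ===== PORT B =====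
def reorder_ops_for_format_alt (ops : List (Int × Int)) (format_tags : List String) : List (Int × Int) :=
  match format_tags with
  | [] => ops
  | tag :: _ =>
    let priority_nums := pvPriority tag
    if priority_nums = [] then ops
    else if tag = "pure_hex" ∨ tag = "hex_pairs" ∨ tag = "binary" then
      let USELESS := if tag = "binary" then pvBinaryUseless else pvHexUseless
      PySem.List.sorted ops
        (fun op => if priority_nums.contains op.1 then (0 : Int)
                   else if USELESS.contains op.1 then 2 else 1) false
    else
      PySem.List.sorted ops
        (fun op => if priority_nums.contains op.1 then (0 : Int) else 1) false

-- ===== PRECONDITION & SPEC =====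
def Spec_reorder_ops_for_format (ops : List (Int × Int)) (format_tags : List String) (out : List (Int × Int)) : Prop := out = reorder_ops_for_format_alt ops format_tags
instance (ops : List (Int × Int)) (format_tags : List String) (out : List (Int × Int)) : Decidable (Spec_reorder_ops_for_format ops format_tags out) := by unfold Spec_reorder_ops_for_format; infer_instance

-- ===== CLAIM (what is proved, stated in full; the proofs are below) =====
def Claim_equal_reorder_ops_for_format : Prop := ∀ (ops : List (Int × Int)) (format_tags : List String), Dom_reorder_ops_for_format ops format_tags → Spec_reorder_ops_for_format ops format_tags (reorder_ops_for_format ops format_tags)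

-- ===== LEMMAS AND PROOFS =====

-- insertBy puts x after a prefix it does not go before and in front of a suffix it does.
theorem insertBy_split {α : Type} (before : α → α → Bool) (x : α) (as bs : List α)
    (ha : ∀ y ∈ as, before x y = false) (hb : ∀ y ∈ bs, before x y = true) :
    PySem.List.insertBy before x (as ++ bs) = as ++ x :: bs := by
  induction as with
  | nil =>
    cases bs with
    | nil => simp [PySem.List.insertBy]
    | cons b bs => simp [PySem.List.insertBy, hb b (by simp)]
  | cons a as ih =>
    have h := ha a (by simp)
    simp [PySem.List.insertBy, h]
    exact ih (fun y hy => ha y (by simp [hy]))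

-- The insertion-sort fold maintains three rank buckets, each in input order.
theorem foldl_insertBy_buckets (rank : (Int × Int) → Int)
    (hr : ∀ x, rank x = 0 ∨ rank x = 1 ∨ rank x = 2)
    (xs f0 f1 f2 : List (Int × Int))
    (h0 : ∀ y ∈ f0, rank y = 0) (h1 : ∀ y ∈ f1, rank y = 1) (h2 : ∀ y ∈ f2, rank y = 2) :
    xs.foldl (fun acc x => PySem.List.insertBy (fun a b => decide (rank a < rank b)) x acc)
        (f0 ++ f1 ++ f2)
      = (f0 ++ xs.filter (fun x => decide (rank x = 0)))
        ++ (f1 ++ xs.filter (fun x => decide (rank x = 1)))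
        ++ (f2 ++ xs.filter (fun x => decide (rank x = 2))) := by
  induction xs generalizing f0 f1 f2 with
  | nil => simp
  | cons x xs ih =>
    rcases hr x with hx | hx | hx
    · have step : PySem.List.insertBy (fun a b => decide (rank a < rank b)) x (f0 ++ f1 ++ f2)
          = f0 ++ x :: (f1 ++ f2) := by
        rw [List.append_assoc]
        exact insertBy_split _ x f0 (f1 ++ f2)
          (fun y hy => by simp [h0 y hy, hx])
          (fun y hy => by
            rcases List.mem_append.1 hy with h | h
            · simp [h1 y h, hx]
            · simp [h2 y h, hx])
      have := ih (f0 ++ [x]) f1 f2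
        (fun y hy => by rcases List.mem_append.1 hy with h | h; exacts [h0 y h, by simp_all]) h1 h2
      simp only [List.foldl_cons, step]
      rw [show f0 ++ x :: (f1 ++ f2) = (f0 ++ [x]) ++ f1 ++ f2 by simp]
      rw [this]; simp [hx]
    · have step : PySem.List.insertBy (fun a b => decide (rank a < rank b)) x (f0 ++ f1 ++ f2)
          = (f0 ++ f1) ++ x :: f2 := by
        exact insertBy_split _ x (f0 ++ f1) f2
          (fun y hy => by
            rcases List.mem_append.1 hy with h | h
            · simp [h0 y h, hx]
            · simp [h1 y h, hx])
          (fun y hy => by simp [h2 y hy, hx])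
      have := ih f0 (f1 ++ [x]) f2 h0
        (fun y hy => by rcases List.mem_append.1 hy with h | h; exacts [h1 y h, by simp_all]) h2
      simp only [List.foldl_cons, step]
      rw [show (f0 ++ f1) ++ x :: f2 = f0 ++ (f1 ++ [x]) ++ f2 by simp]
      rw [this]; simp [hx]
    · have step : PySem.List.insertBy (fun a b => decide (rank a < rank b)) x (f0 ++ f1 ++ f2)
          = (f0 ++ f1 ++ f2) ++ [x] := by
        apply PySem.List.insertBy_of_forall_not_before
        intro y hy
        rcases List.mem_append.1 hy with h | h
        · rcases List.mem_append.1 h with h' | h'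
          · simp [h0 y h', hx]
          · simp [h1 y h', hx]
        · simp [h2 y h, hx]
      have := ih f0 f1 (f2 ++ [x]) h0 h1
        (fun y hy => by rcases List.mem_append.1 hy with h | h; exacts [h2 y h, by simp_all])
      simp only [List.foldl_cons, step]
      rw [show (f0 ++ f1 ++ f2) ++ [x] = f0 ++ f1 ++ (f2 ++ [x]) by simp]
      rw [this]; simp [hx]

-- A stable sort by a three-valued rank is the concatenation of the three rank buckets.
theorem sorted_rank3 (P U : List Int) (ops : List (Int × Int))
    (hPU : P.all (fun a => !(U.contains a)) = true) :
    PySem.List.sorted ops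
      (fun op => if P.contains op.1 then (0 : Int) else if U.contains op.1 then 2 else 1) false
    = ops.filter (fun op => P.contains op.1)
      ++ ops.filter (fun op => !(P.contains op.1) && !(U.contains op.1))
      ++ ops.filter (fun op => U.contains op.1) := by
  set rank : (Int × Int) → Int :=
    fun op => if P.contains op.1 then (0 : Int) else if U.contains op.1 then 2 else 1 with hrank
  rw [PySem.List.sorted_eq_foldl_insertBy]
  have h := foldl_insertBy_buckets rank
    (by intro x; simp only [hrank]; split_ifs <;> simp) ops [] [] []
    (by simp) (by simp) (by simp)
  simp only [List.nil_append, List.append_nil] at h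
  rw [h]
  have e0 : ops.filter (fun x => decide (rank x = 0)) = ops.filter (fun op => P.contains op.1) := by
    apply List.filter_congr; intro x _
    simp only [hrank]; split_ifs with h1 h2 <;> simp_all
  have e1 : ops.filter (fun x => decide (rank x = 1))
      = ops.filter (fun op => !(P.contains op.1) && !(U.contains op.1)) := by
    apply List.filter_congr; intro x _
    simp only [hrank]; split_ifs with h1 h2 <;> simp_all
  have e2 : ops.filter (fun x => decide (rank x = 2)) = ops.filter (fun op => U.contains op.1) := by
    apply List.filter_congr; intro x _
    simp only [hrank]; split_ifs with h1 h2
    · have hm : x.1 ∈ P := by simpa using h1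
      have hu := List.all_eq_true.1 hPU x.1 hm
      simp_all
    · simp_all
    · simp_all
  rw [e0, e1, e2]

-- A stable sort by a two-valued rank is prioritized ++ rest.
theorem sorted_rank2 (P : List Int) (ops : List (Int × Int)) :
    PySem.List.sorted ops (fun op => if P.contains op.1 then (0 : Int) else 1) false
    = ops.filter (fun op => P.contains op.1) ++ ops.filter (fun op => !(P.contains op.1)) := by
  set rank : (Int × Int) → Int := fun op => if P.contains op.1 then (0 : Int) else 1 with hrank
  rw [PySem.List.sorted_eq_foldl_insertBy]
  have h := foldl_insertBy_buckets rank
    (by intro x; simp only [hrank]; split_ifs <;> simp) ops [] [] []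
    (by simp) (by simp) (by simp)
  simp only [List.nil_append, List.append_nil] at h
  rw [h]
  have h2 : ops.filter (fun x => decide (rank x = 2)) = [] := by
    apply List.filter_eq_nil_iff.2; intro x _
    simp only [hrank]; split_ifs <;> simp
  have e0 : ops.filter (fun x => decide (rank x = 0)) = ops.filter (fun op => P.contains op.1) := by
    apply List.filter_congr; intro x _
    simp only [hrank]; split_ifs with h1 <;> simp_all
  have e1 : ops.filter (fun x => decide (rank x = 1)) = ops.filter (fun op => !(P.contains op.1)) := by
    apply List.filter_congr; intro x _
    simp only [hrank]; split_ifs with h1 <;> simp_all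
  rw [h2, List.append_nil, e0, e1]

-- ===== VERDICT (by name: the statement is the Claim_ definition above) =====
theorem reorder_ops_for_format_spec : Claim_equal_reorder_ops_for_format := by
  intro ops format_tags _
  unfold Spec_reorder_ops_for_format reorder_ops_for_format reorder_ops_for_format_alt
  cases format_tags with
  | nil => rfl
  | cons tag rest =>
    simp only
    by_cases hp : pvPriority tag = []
    · simp [hp]
    · simp only [if_neg hp]
      by_cases ht : tag = "pure_hex" ∨ tag = "hex_pairs" ∨ tag = "binary"
      · simp only [if_pos ht]
        by_cases hb : tag = "binary"
        · subst hb
          exact (sorted_rank3 (pvPriority "binary") pvBinaryUseless ops (by decide)).symm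
        · simp only [if_neg hb]
          rcases ht with h | h | h
          · subst h
            exact (sorted_rank3 (pvPriority "pure_hex") pvHexUseless ops (by decide)).symm
          · subst h
            exact (sorted_rank3 (pvPriority "hex_pairs") pvHexUseless ops (by decide)).symm
          · exact absurd h hb
      · simp only [if_neg ht]
        exact (sorted_rank2 (pvPriority tag) ops).symm
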